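-- pv_equiv track=rewrite | github.com/PicsArt/cppbind | src/cppbind/converter/__init__.py | relative_package
-- ===== SOURCE A (Python) =====
-- def relative_package(namespace1, namespace2):
--     ii = 0
--     end_idx = 0
--     l = min(len(namespace2), len(namespace1))
--     while ii < l and namespace1[ii] == namespace2[ii]:
--         if namespace1[ii] == '.':
--             end_idx = ii + 1
--         ii += 1
--
--     return namespace1[end_idx:]
-- ===== SOURCE B (Python) =====
-- def relative_package(namespace1, namespace2):
--     # Split namespace1 into dot-separated components and greedily consume whole
--     # "component." units as long as namespace2 carries the same unit at the running offset.
--     pos = 0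
--     for part in namespace1.split('.')[:-1]:
--         if not namespace2.startswith(part + '.', pos):
--             break
--         pos += len(part) + 1
--     return namespace1[pos:]
-- ===== Notes on version B (the rewrite author's own statement) =====
-- stated objective: alternative
-- what changed: Instead of A's char-by-char fused scan that updates end_idx at each matched dot, B splits namespace1 into dot-separated components and greedily consumes whole 'component.' units while namespace2 carries the same unit at the running offset, returning the unconsumed tail.
import Mathlib
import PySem

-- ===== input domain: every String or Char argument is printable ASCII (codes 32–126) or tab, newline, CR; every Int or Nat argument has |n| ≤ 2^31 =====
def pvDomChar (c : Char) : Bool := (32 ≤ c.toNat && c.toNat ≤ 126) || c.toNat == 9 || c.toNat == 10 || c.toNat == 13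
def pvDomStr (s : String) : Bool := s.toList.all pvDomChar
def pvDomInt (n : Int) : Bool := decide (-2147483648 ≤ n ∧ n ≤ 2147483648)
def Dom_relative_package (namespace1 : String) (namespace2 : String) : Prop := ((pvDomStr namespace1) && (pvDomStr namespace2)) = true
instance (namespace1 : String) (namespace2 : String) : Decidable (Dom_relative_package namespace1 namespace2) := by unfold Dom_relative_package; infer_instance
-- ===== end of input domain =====

-- B replaces A's char-by-char fused scan (which updates end_idx inline at each matched dot)
-- by a component-level algorithm: split namespace1 on '.', greedily consume whole
-- "component." units matched in namespace2 at the running offset (split + bulk startswith instead of a per-char loop); objective: alternative.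

-- ===== PORT A =====
-- A's while loop: walks both strings in step while characters match (ii < min length is the
-- list-exhaustion case), recording end_idx = ii + 1 at each matched '.'.
def relAuxA : List Char → List Char → Nat → Nat → Nat
  | c1 :: t1, c2 :: t2, ii, e =>
      if c1 = c2 then relAuxA t1 t2 (ii + 1) (if c1 = '.' then ii + 1 else e) else e
  | _, _, _, e => e

def relative_package (namespace1 : String) (namespace2 : String) : String :=
  -- end_idx after the loop, then namespace1[end_idx:] (end_idx ≥ 0, so a plain drop)
  String.mk (namespace1.toList.drop (relAuxA namespace1.toList namespace2.toList 0 0))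

-- ===== PORT B =====
-- str.split('.') for a one-character separator, exact: '' ↦ [''], '.' ↦ ['','']
def splitDot : List Char → List (List Char)
  | [] => [[]]
  | c :: t =>
      match splitDot t with
      | [] => [[]]  -- unreachable: splitDot never returns []
      | h :: r => if c = '.' then [] :: h :: r else (c :: h) :: r

-- Source B's for-loop with break: consume "part ++ '.'" from the remaining suffix of namespace2
-- (namespace2.startswith(part + '.', pos) = the next |part|+1 chars after pos are part ++ '.').
def relAuxB : List (List Char) → List Char → Nat → Nat
  | [], _, pos => pos
  | part :: rest, r2, pos =>
      if r2.take (part.length + 1) = part ++ ['.']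
      then relAuxB rest (r2.drop (part.length + 1)) (pos + (part.length + 1))
      else pos

def relative_package_alt (namespace1 : String) (namespace2 : String) : String :=
  -- pos after the loop over namespace1.split('.')[:-1], then namespace1[pos:]
  String.mk (namespace1.toList.drop
    (relAuxB ((splitDot namespace1.toList).dropLast) namespace2.toList 0))

-- ===== PRECONDITION & SPEC =====
def Spec_relative_package (namespace1 : String) (namespace2 : String) (out : String) : Prop := out = relative_package_alt namespace1 namespace2
instance (namespace1 : String) (namespace2 : String) (out : String) : Decidable (Spec_relative_package namespace1 namespace2 out) := by unfold Spec_relative_package; infer_instance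

-- ===== CLAIM (what is proved, stated in full; the proofs are below) =====
def Claim_equal_relative_package : Prop := ∀ (namespace1 : String) (namespace2 : String), Dom_relative_package namespace1 namespace2 → Spec_relative_package namespace1 namespace2 (relative_package namespace1 namespace2)

-- ===== LEMMAS AND PROOFS =====

-- the common prefix of two character lists
def pvCp : List Char → List Char → List Char
  | c1 :: t1, c2 :: t2 => if c1 = c2 then c1 :: pvCp t1 t2 else []
  | _, _ => []

-- A's loop restricted to the matched region: scan the common prefix, tracking the last '.'
def pvScan : List Char → Nat → Nat → Nat
  | [], _, e => e
  | c :: t, ii, e => pvScan t (ii + 1) (if c = '.' then ii + 1 else e)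

lemma relAuxA_eq_scan : ∀ (l1 l2 : List Char) (ii e : Nat),
    relAuxA l1 l2 ii e = pvScan (pvCp l1 l2) ii e := by
  intro l1
  induction l1 with
  | nil => intro l2 ii e; cases l2 <;> rfl
  | cons c1 t1 ih =>
    intro l2 ii e
    cases l2 with
    | nil => rfl
    | cons c2 t2 =>
      by_cases h : c1 = c2
      · simp [relAuxA, pvCp, pvScan, h, ih]
      · simp [relAuxA, pvCp, pvScan, h]

lemma splitDot_ne_nil : ∀ l : List Char, splitDot l ≠ [] := by
  intro l
  cases l with
  | nil => simp [splitDot]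
  | cons c t =>
    simp only [splitDot]
    cases splitDot t with
    | nil => simp
    | cons h r => split_ifs <;> simp

lemma splitDot_nodot : ∀ l : List Char, '.' ∉ l → splitDot l = [l] := by
  intro l
  induction l with
  | nil => intro _; rfl
  | cons c t ih =>
    intro h
    have hc : c ≠ '.' := fun hc => h (by simp [hc])
    have ht : '.' ∉ t := fun hm => h (List.mem_cons_of_mem _ hm)
    simp [splitDot, ih ht, hc]

lemma splitDot_app : ∀ (p rest : List Char), '.' ∉ p →
    splitDot (p ++ '.' :: rest) = p :: splitDot rest := by
  intro p
  induction p with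
  | nil =>
    intro rest _
    have := splitDot_ne_nil rest
    simp only [List.nil_append, splitDot]
    cases h : splitDot rest with
    | nil => exact absurd h this
    | cons a b => simp
  | cons c t ih =>
    intro rest h
    have hc : c ≠ '.' := fun hc => h (by simp [hc])
    have ht : '.' ∉ t := fun hm => h (List.mem_cons_of_mem _ hm)
    simp only [List.cons_append, splitDot, ih rest ht, hc, if_false]

lemma firstDot : ∀ l : List Char, '.' ∈ l → ∃ p rest, l = p ++ '.' :: rest ∧ '.' ∉ p := by
  intro l
  induction l with
  | nil => intro h; simp at h
  | cons c t ih =>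
    intro h
    by_cases hc : c = '.'
    · exact ⟨[], t, by simp [hc], by simp⟩
    · have : '.' ∈ t := by
        rcases List.mem_cons.mp h with h1 | h1
        · exact absurd h1.symm hc
        · exact h1
      obtain ⟨p, rest, hpr, hnp⟩ := ih this
      refine ⟨c :: p, rest, by simp [hpr], ?_⟩
      intro hm
      rcases List.mem_cons.mp hm with h1 | h1
      · exact hc h1.symm
      · exact hnp h1

lemma pvCp_prefix_left : ∀ a b : List Char, pvCp a b <+: a := by
  intro a
  induction a with
  | nil => intro b; cases b <;> simp [pvCp]
  | cons c1 t1 ih =>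
    intro b
    cases b with
    | nil => simp [pvCp]
    | cons c2 t2 =>
      by_cases h : c1 = c2
      · simp only [pvCp, h, if_pos]
        exact List.cons_prefix_cons.mpr ⟨rfl, ih t2⟩
      · simp [pvCp, h]

lemma pvCp_prefix_right : ∀ a b : List Char, pvCp a b <+: b := by
  intro a
  induction a with
  | nil => intro b; cases b <;> simp [pvCp]
  | cons c1 t1 ih =>
    intro b
    cases b with
    | nil => simp [pvCp]
    | cons c2 t2 =>
      by_cases h : c1 = c2
      · subst h
        simp only [pvCp, if_pos rfl]
        exact List.cons_prefix_cons.mpr ⟨rfl, ih t2⟩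
      · simp [pvCp, h]

lemma pvScan_nodot : ∀ (l : List Char) (ii e : Nat), '.' ∉ l → pvScan l ii e = e := by
  intro l
  induction l with
  | nil => intro ii e _; rfl
  | cons c t ih =>
    intro ii e h
    have hc : c ≠ '.' := fun hc => h (by simp [hc])
    have ht : '.' ∉ t := fun hm => h (List.mem_cons_of_mem _ hm)
    simp [pvScan, hc, ih _ _ ht]

lemma pvScan_append : ∀ (a b : List Char) (ii e : Nat),
    pvScan (a ++ b) ii e = pvScan b (ii + a.length) (pvScan a ii e) := by
  intro a
  induction a with
  | nil => intro b ii e; simp [pvScan]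
  | cons c t ih =>
    intro b ii e
    simp only [List.cons_append, pvScan, ih, List.length_cons]
    ring_nf

lemma pvCp_append_same : ∀ (x a b : List Char), pvCp (x ++ a) (x ++ b) = x ++ pvCp a b := by
  intro x
  induction x with
  | nil => intro a b; rfl
  | cons c t ih => intro a b; simp [pvCp, ih]

lemma take_len_succ : ∀ (p : List Char) (c : Char) (r : List Char),
    (p ++ c :: r).take (p.length + 1) = p ++ [c] := by
  intro p
  induction p with
  | nil => intro c r; rfl
  | cons a t ih => intro c r; simp [List.take_cons, ih]

-- main lemma: B's component loop computes the same cut position as A's scan of the common prefix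
lemma relAuxB_eq_scan (r1 r2 : List Char) (pos : Nat) :
    relAuxB ((splitDot r1).dropLast) r2 pos = pvScan (pvCp r1 r2) pos pos := by
  by_cases hd : '.' ∈ r1
  · obtain ⟨p, rest, hpr, hnp⟩ := firstDot r1 hd
    subst hpr
    rw [splitDot_app p rest hnp]
    have hdl : (p :: splitDot rest).dropLast = p :: (splitDot rest).dropLast := by
      cases h : splitDot rest with
      | nil => exact absurd h (splitDot_ne_nil rest)
      | cons a b => simp
    rw [hdl]
    by_cases hc : r2.take (p.length + 1) = p ++ ['.']
    · -- namespace2 carries "p." at the offset: both advance past the dot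
      have hr2 : r2 = (p ++ ['.']) ++ r2.drop (p.length + 1) := by
        conv_lhs => rw [← List.take_append_drop (p.length + 1) r2]
        rw [hc]
      have hcp : pvCp (p ++ '.' :: rest) r2 = (p ++ ['.']) ++ pvCp rest (r2.drop (p.length + 1)) := by
        conv_lhs => rw [hr2]
        have : p ++ '.' :: rest = (p ++ ['.']) ++ rest := by simp
        rw [this, pvCp_append_same]
      rw [hcp, pvScan_append]
      have hplen : (p ++ ['.']).length = p.length + 1 := by simp
      have hscanp : pvScan (p ++ ['.']) pos pos = pos + (p.length + 1) := by
        rw [pvScan_append, pvScan_nodot p pos pos hnp]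
        simp [pvScan]
        omega
      rw [hplen, hscanp]
      have ih := relAuxB_eq_scan rest (r2.drop (p.length + 1)) (pos + (p.length + 1))
      simp only [relAuxB, if_pos hc]
      rw [ih]
    · -- mismatch inside "p.": the common prefix is a dot-free prefix of p
      have hk : (pvCp (p ++ '.' :: rest) r2).length ≤ p.length := by
        by_contra hgt
        push_neg at hgt
        have h1 := pvCp_prefix_left (p ++ '.' :: rest) r2
        have h2 := pvCp_prefix_right (p ++ '.' :: rest) r2
        set cp := pvCp (p ++ '.' :: rest) r2 with hcpdef
        have e1 : cp.take (p.length + 1) = (p ++ '.' :: rest).take (p.length + 1) := by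
          obtain ⟨s, hs⟩ := h1
          rw [← hs, List.take_append_of_le_length (by omega)]
        have e2 : cp.take (p.length + 1) = r2.take (p.length + 1) := by
          obtain ⟨s, hs⟩ := h2
          rw [← hs, List.take_append_of_le_length (by omega)]
        have e3 : (p ++ '.' :: rest).take (p.length + 1) = p ++ ['.'] := take_len_succ p '.' rest
        exact hc (by rw [← e2, e1, e3])
      have hcp_pref_p : pvCp (p ++ '.' :: rest) r2 <+: p := by
        have hcpeq := List.prefix_iff_eq_take.mp (pvCp_prefix_left (p ++ '.' :: rest) r2)
        rw [hcpeq, List.take_append_of_le_length hk]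
        exact List.take_prefix _ _
      have hnd : '.' ∉ pvCp (p ++ '.' :: rest) r2 := fun hm => hnp (hcp_pref_p.subset hm)
      rw [pvScan_nodot _ _ _ hnd]
      simp only [relAuxB, if_neg hc]
  · -- no dot in namespace1: split has a single component, dropLast = [], pos stays 0-advanced
    rw [splitDot_nodot r1 hd]
    have hnd : '.' ∉ pvCp r1 r2 := fun hm => hd ((pvCp_prefix_left r1 r2).subset hm)
    rw [pvScan_nodot _ _ _ hnd]
    rfl
termination_by r1.length
decreasing_by
  subst hpr
  simp only [List.length_append, List.length_cons]
  omega

-- ===== VERDICT (by name: the statement is the Claim_ definition above) =====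
theorem relative_package_spec : Claim_equal_relative_package := by
  intro namespace1 namespace2 _
  unfold Spec_relative_package relative_package relative_package_alt
  rw [relAuxA_eq_scan, relAuxB_eq_scan]
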